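-- pv_equiv track=rewrite | github.com/das-keyboard/adventofcode-2017 | 7/day7-2.py | getprogrammweight
-- ===== SOURCE A (Python) =====
-- def getprogrammweight(programms, pro: str):
--     sum = 0
--     for programm in programms:
--         if programm[0] == pro:
--             if len(programm[2]) > 0:
--                 for prog in programm[2]:
--                     a = getprogrammweight(programms, prog)
--                     sum += a
--                 return int(sum + int(programm[1]))
--             else:
--                 return int(programm[1])
--     return 0
-- ===== SOURCE B (Python) =====
-- def getprogrammweight(programms, pro: str):
--     total = 0
--     stack = [pro]
--     while stack:
--         name = stack.pop()
--         for t in programms: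
--             if t[0] == name:
--                 total += int(t[1])
--                 stack.extend(t[2])
--                 break
--     return int(total)
-- ===== Notes on version B (the rewrite author's own statement) =====
-- stated objective: alternative
-- what changed: Replaces the recursive descent with an iterative explicit-stack worklist that pops a name, adds the weight of its first matching tuple and pushes its children, accumulating one running total instead of nesting recursive calls.
import Mathlib
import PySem

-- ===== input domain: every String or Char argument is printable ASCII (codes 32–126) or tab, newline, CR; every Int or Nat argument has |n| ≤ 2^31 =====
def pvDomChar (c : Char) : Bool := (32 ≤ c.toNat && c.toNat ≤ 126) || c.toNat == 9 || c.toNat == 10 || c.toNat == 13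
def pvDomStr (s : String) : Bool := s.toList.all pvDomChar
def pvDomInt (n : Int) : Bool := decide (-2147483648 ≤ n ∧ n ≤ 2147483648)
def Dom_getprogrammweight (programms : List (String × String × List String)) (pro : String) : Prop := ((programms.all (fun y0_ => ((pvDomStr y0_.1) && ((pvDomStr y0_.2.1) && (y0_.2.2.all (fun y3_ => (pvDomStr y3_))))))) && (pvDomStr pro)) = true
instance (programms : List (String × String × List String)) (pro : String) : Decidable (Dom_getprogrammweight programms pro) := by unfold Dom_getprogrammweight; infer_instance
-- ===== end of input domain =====

-- B replaces A's recursive descent by an iterative explicit-stack worklist (same cost, same value).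
-- Both ports carry a per-entry "remaining names" list purely as a totality guard (Python recurses/loops
-- unboundedly on cyclic inputs, which Pre_ excludes); on inputs admitted by Pre_ the guard never fires.

-- ===== PORT A =====
-- int(programm[1]); ValueError mapped to a junk 0 (Pre_ excludes inputs where int() raises on a reached weight)
def pvWD (w : String) : Int := (PySem.Int.ofStr? w).getD 0

-- A's for-loop over programms looking for the first tuple named pro (sum accumulated inside the match branch)
def pvScanA (visit : String → Int) : List (String × String × List String) → String → Int
  | [], _ => 0
  | (name, w, ch) :: rest, pro =>
    if name == pro then
      if 0 < ch.length then (ch.foldl (fun s c => s + visit c) 0) + pvWD w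
      else pvWD w
    else pvScanA visit rest pro

def pvVisitA (ps : List (String × String × List String)) : List String → String → Int
  | av, pro =>
    if h : pro ∈ av then pvScanA (fun c => pvVisitA ps (av.erase pro) c) ps pro else 0
  termination_by av _ => av.length
  decreasing_by
    have h1 := List.length_erase_of_mem h
    have h2 := List.length_pos_of_mem h
    omega

def getprogrammweight (programms : List (String × String × List String)) (pro : String) : Int :=
  pvVisitA programms (programms.map (fun t => t.1)) pro

-- ===== PORT B =====
-- the inner for-loop with break: first tuple whose [0] equals name
def pvFindB : List (String × String × List String) → String → Option (String × List String)
  | [], _ => none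
  | (n, w, ch) :: rest, name => if n == name then some (w, ch) else pvFindB rest name

-- largest number of children of any tuple (used only by the termination measure of the loop)
def pvMaxCh (ps : List (String × String × List String)) : Nat :=
  ps.foldl (fun m t => max m t.2.2.length) 0

def pvMeasureB (ps : List (String × String × List String)) (stack : List (String × List String)) : Nat :=
  (stack.map (fun e => (pvMaxCh ps + 1) ^ e.2.length)).sum

theorem pvFoldlMax_init_le (rest : List (String × String × List String)) (m : Nat) :
    m ≤ List.foldl (fun m t => max m t.2.2.length) m rest := by
  induction rest generalizing m with
  | nil => simp
  | cons u us ih => exact le_trans (le_max_left _ _) (ih _)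

theorem pvFoldlMax_mono (rest : List (String × String × List String)) (m m' : Nat) (h : m ≤ m') :
    List.foldl (fun m t => max m t.2.2.length) m rest ≤ List.foldl (fun m t => max m t.2.2.length) m' rest := by
  induction rest generalizing m m' with
  | nil => simpa
  | cons u us ih => exact ih _ _ (max_le_max_right _ h)

theorem pvFindB_ch_le (ps : List (String × String × List String)) (name w : String)
    (ch : List String) (h : pvFindB ps name = some (w, ch)) : ch.length ≤ pvMaxCh ps := by
  induction ps with
  | nil => simp [pvFindB] at h
  | cons t rest ih =>
    obtain ⟨n, w', ch'⟩ := t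
    simp only [pvFindB] at h
    by_cases hn : (n == name) = true
    · simp [hn] at h
      simp only [pvMaxCh, List.foldl_cons, h.2]
      exact le_trans (le_max_right _ _) (pvFoldlMax_init_le _ _)
    · simp [hn] at h
      have := ih h
      simp only [pvMaxCh, List.foldl_cons]
      exact le_trans this (pvFoldlMax_mono _ _ _ (Nat.zero_le _))

theorem pvMeasureB_cons (ps : List (String × String × List String)) (e : String × List String)
    (rest : List (String × List String)) :
    pvMeasureB ps (e :: rest) = (pvMaxCh ps + 1) ^ e.2.length + pvMeasureB ps rest := by
  simp [pvMeasureB]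

-- the while-loop: pop a name, add the first matching weight, push the children (with a shrunken guard list)
def pvLoopB (ps : List (String × String × List String)) : Int → List (String × List String) → Int
  | total, [] => total
  | total, (name, av) :: rest =>
    match h : pvFindB ps name with
    | none => pvLoopB ps total rest
    | some (w, ch) =>
      if hm : name ∈ av then
        pvLoopB ps (total + pvWD w) ((ch.reverse.map (fun c => (c, av.erase name))) ++ rest)
      else pvLoopB ps total rest
  termination_by _ stack => pvMeasureB ps stack
  decreasing_by
  · rw [pvMeasureB_cons]
    exact Nat.lt_add_of_pos_left (pow_pos (Nat.succ_pos _) _)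
  · rw [pvMeasureB_cons]
    have hlen : (av.erase name).length + 1 = av.length := by
      rw [List.length_erase_of_mem hm]
      exact Nat.succ_pred_eq_of_pos (List.length_pos_of_mem hm)
    have hch : ch.length ≤ pvMaxCh ps := pvFindB_ch_le ps name w ch h
    have hnew : pvMeasureB ps ((ch.reverse.map (fun c => (c, av.erase name))) ++ rest)
        = ch.length * (pvMaxCh ps + 1) ^ (av.erase name).length + pvMeasureB ps rest := by
      simp only [pvMeasureB, List.map_append, List.sum_append, List.map_map, List.map_reverse,
        List.sum_reverse, Function.comp_def]
      rw [List.map_const', List.sum_replicate, smul_eq_mul]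
    rw [hnew]
    dsimp only
    have : ch.length * (pvMaxCh ps + 1) ^ (av.erase name).length
        < (pvMaxCh ps + 1) ^ av.length := by
      rw [← hlen, pow_succ]
      have hP : 0 < (pvMaxCh ps + 1) ^ (av.erase name).length := pow_pos (Nat.succ_pos _) _
      have h1 : ch.length * (pvMaxCh ps + 1) ^ (av.erase name).length
          ≤ pvMaxCh ps * (pvMaxCh ps + 1) ^ (av.erase name).length := Nat.mul_le_mul_right _ hch
      have h2 : (pvMaxCh ps + 1) ^ (av.erase name).length * (pvMaxCh ps + 1)
          = pvMaxCh ps * (pvMaxCh ps + 1) ^ (av.erase name).length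
            + (pvMaxCh ps + 1) ^ (av.erase name).length := by ring
      omega
    omega
  · rw [pvMeasureB_cons]
    exact Nat.lt_add_of_pos_left (pow_pos (Nat.succ_pos _) _)

def getprogrammweight_alt (programms : List (String × String × List String)) (pro : String) : Int :=
  pvLoopB programms 0 [(pro, programms.map (fun t => t.1))]

-- ===== PRECONDITION & SPEC =====
-- Pre_ admits exactly the inputs where Python A returns: every name reachable from pro along
-- first-match edges has a parseable weight when matched, and no matched reachable name lies on a
-- cycle (on a cycle A hits RecursionError, B loops; on a reachable unparseable weight both raise ValueError).
def pvLookup (ps : List (String × String × List String)) (n : String) : Option (String × List String) :=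
  (ps.find? (fun t => t.1 == n)).map (fun t => t.2)

def pvChildren (ps : List (String × String × List String)) (n : String) : List String :=
  match pvLookup ps n with
  | some (_, ch) => ch
  | none => []

def pvReach (ps : List (String × String × List String)) : Nat → List String → List String
  | 0, S => S
  | k+1, S => pvReach ps k (PySem.Set.ofList (S ++ S.flatMap (pvChildren ps)))

-- a reachable name is OK if it matches nothing, or its first match has a parseable weight and no cycle back to it
def pvOkB (ps : List (String × String × List String)) (k : Nat) (n : String) : Bool :=
  match pvLookup ps n with
  | none => true
  | some (w, ch) => (PySem.Int.ofStr? w).isSome && !((pvReach ps k ch).contains n)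

def Pre_getprogrammweight (programms : List (String × String × List String)) (pro : String) : Prop :=
  ∀ n ∈ pvReach programms (programms.length + 1) [pro], pvOkB programms (programms.length + 1) n = true
instance (programms : List (String × String × List String)) (pro : String) : Decidable (Pre_getprogrammweight programms pro) := by unfold Pre_getprogrammweight; infer_instance

def pvWitness_getprogrammweight : (List (String × String × List String)) × String :=
  ([("a", "1", ["b", "c"]), ("b", "2", []), ("c", "3", [])], "a")

def Spec_getprogrammweight (programms : List (String × String × List String)) (pro : String) (out : Int) : Prop := out = getprogrammweight_alt programms pro
instance (programms : List (String × String × List String)) (pro : String) (out : Int) : Decidable (Spec_getprogrammweight programms pro out) := by unfold Spec_getprogrammweight; infer_instance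

-- ===== CLAIM (what is proved, stated in full; the proofs are below) =====
def Claim_equal_getprogrammweight : Prop := ∀ (programms : List (String × String × List String)) (pro : String), Dom_getprogrammweight programms pro → Pre_getprogrammweight programms pro → Spec_getprogrammweight programms pro (getprogrammweight programms pro)

-- ===== LEMMAS AND PROOFS =====

theorem pvVisitA_eq (ps : List (String × String × List String)) (av : List String) (pro : String) :
    pvVisitA ps av pro =
      if pro ∈ av then pvScanA (fun c => pvVisitA ps (av.erase pro) c) ps pro else 0 := by
  rw [pvVisitA]
  split_ifs <;> rfl

theorem pvScanA_none (visit : String → Int) (ps : List (String × String × List String))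
    (pro : String) (h : pvFindB ps pro = none) : pvScanA visit ps pro = 0 := by
  induction ps with
  | nil => rfl
  | cons t rest ih =>
    obtain ⟨n, w, ch⟩ := t
    simp only [pvFindB] at h
    by_cases hn : (n == pro) = true
    · simp [hn] at h
    · simp [hn] at h
      simp [pvScanA, hn, ih h]

theorem pvScanA_some (visit : String → Int) (ps : List (String × String × List String))
    (pro w : String) (ch : List String) (h : pvFindB ps pro = some (w, ch)) :
    pvScanA visit ps pro = (ch.foldl (fun s c => s + visit c) 0) + pvWD w := by
  induction ps with
  | nil => simp [pvFindB] at h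
  | cons t rest ih =>
    obtain ⟨n, w', ch'⟩ := t
    simp only [pvFindB] at h
    by_cases hn : (n == pro) = true
    · simp [hn] at h
      obtain ⟨rfl, rfl⟩ := h
      cases ch' with
      | nil => simp [pvScanA, hn]
      | cons c cs => simp [pvScanA, hn]
    · simp [hn] at h
      simp [pvScanA, hn, ih h]

theorem pvFoldl_add_eq_sum (v : String → Int) (ch : List String) (i : Int) :
    ch.foldl (fun s c => s + v c) i = i + (ch.map v).sum := by
  induction ch generalizing i with
  | nil => simp
  | cons c cs ih => simp [List.foldl_cons, ih]; ring

theorem pvLoopB_eq (ps : List (String × String × List String)) (total : Int)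
    (stack : List (String × List String)) :
    pvLoopB ps total stack = total + (stack.map (fun e => pvVisitA ps e.2 e.1)).sum := by
  fun_induction pvLoopB ps total stack with
  | case1 total => simp
  | case2 total name av rest h ih =>
    rw [ih]
    simp only [List.map_cons, List.sum_cons]
    rw [pvVisitA_eq]
    by_cases hm : name ∈ av
    · simp [hm, pvScanA_none _ _ _ h]
    · simp [hm]
  | case3 total name av rest w ch h hm ih =>
    rw [ih]
    simp only [List.map_cons, List.sum_cons]
    rw [pvVisitA_eq, if_pos hm, pvScanA_some _ _ _ _ _ h, pvFoldl_add_eq_sum]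
    simp only [List.map_append, List.sum_append, List.map_map, Function.comp_def]
    simp only [List.map_reverse, List.sum_reverse]
    ring
  | case4 total name av rest w ch h hm ih =>
    rw [ih]
    simp only [List.map_cons, List.sum_cons]
    rw [pvVisitA_eq, if_neg hm]
    simp

-- ===== VERDICT (by name: the statement is the Claim_ definition above) =====
theorem getprogrammweight_spec : Claim_equal_getprogrammweight := by
  intro ps pro _ _
  unfold Spec_getprogrammweight getprogrammweight getprogrammweight_alt
  rw [pvLoopB_eq]
  simp
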